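-- pv_equiv track=rewrite | github.com/Ritik22singh/Automata_cp22 | cfg_simplifier.py | remove_non_generating
-- ===== SOURCE A (Python) =====
-- def remove_non_generating(grammar):
--     """Remove variables that cannot derive any terminal string."""
--     non_terminals = set(grammar.keys())   # ← uses CURRENT grammar, not self.grammar
--     generating    = set()
--
--     changed = True
--     while changed:
--         changed = False
--         for A, prods in grammar.items():
--             if A in generating:
--                 continue
--             for prod in prods:
--                 # ε itself is a valid terminal string
--                 if prod == ['ε']:
--                     if A not in generating:
--                         generating.add(A)
--                         changed = True
--                     break
--                 # All symbols must be terminals OR already generating NTs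
--                 if all(X not in non_terminals or X in generating for X in prod):
--                     if A not in generating:
--                         generating.add(A)
--                         changed = True
--                     break
--
--     new_grammar = {}
--     for A in generating:
--         if A not in grammar:
--             continue
--         new_prods = [
--             prod for prod in grammar[A]
--             if prod == ['ε'] or
--                all(X not in non_terminals or X in generating for X in prod)
--         ]
--         if new_prods:
--             new_grammar[A] = new_prods
--
--     return new_grammar
-- ===== SOURCE B (Python) =====
-- def remove_non_generating(grammar):
--     """Remove variables that cannot derive any terminal string."""
--     non_terminals = set(grammar.keys())
--
--     # Index every production once: owner[p] / counts[p] give the LHS and the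
--     # number of unresolved nonterminal occurrences of production p; occ[X]
--     # lists the productions in which nonterminal X occurs (with multiplicity).
--     occ = {}
--     owner = []
--     counts = []
--     generating = set()
--     queue = []
--     pid = 0
--     for A, prods in grammar.items():
--         for prod in prods:
--             syms = [] if prod == ['ε'] else [X for X in prod if X in non_terminals]
--             for X in syms:
--                 occ.setdefault(X, []).append(pid)
--             owner.append(A)
--             counts.append(len(syms))
--             if not syms and A not in generating:
--                 generating.add(A)
--                 queue.append(A)
--             pid += 1
--
--     # Propagate: when X becomes generating, decrement the unresolved count of
--     # every production containing X; a production reaching 0 resolves its owner.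
--     while queue:
--         X = queue.pop()
--         for p in occ.get(X, []):
--             counts[p] -= 1
--             if counts[p] == 0:
--                 A = owner[p]
--                 if A not in generating:
--                     generating.add(A)
--                     queue.append(A)
--
--     new_grammar = {}
--     for A, prods in grammar.items():
--         if A in generating:
--             new_prods = [
--                 prod for prod in prods
--                 if prod == ['ε'] or
--                    all(X not in non_terminals or X in generating for X in prod)
--             ]
--             if new_prods:
--                 new_grammar[A] = new_prods
--     return new_grammar
-- ===== Notes on version B (the rewrite author's own statement) =====
-- stated objective: alternative
-- what changed: B replaces A's repeated whole-grammar fixpoint rounds with a counter/worklist propagation: it indexes every production once (per-production unresolved-nonterminal counters plus an occurrence list per nonterminal) and then propagates each newly generating nonterminal through a queue, decrementing only the productions it occurs in, instead of rescanning the grammar until nothing changes.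
import Mathlib
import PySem

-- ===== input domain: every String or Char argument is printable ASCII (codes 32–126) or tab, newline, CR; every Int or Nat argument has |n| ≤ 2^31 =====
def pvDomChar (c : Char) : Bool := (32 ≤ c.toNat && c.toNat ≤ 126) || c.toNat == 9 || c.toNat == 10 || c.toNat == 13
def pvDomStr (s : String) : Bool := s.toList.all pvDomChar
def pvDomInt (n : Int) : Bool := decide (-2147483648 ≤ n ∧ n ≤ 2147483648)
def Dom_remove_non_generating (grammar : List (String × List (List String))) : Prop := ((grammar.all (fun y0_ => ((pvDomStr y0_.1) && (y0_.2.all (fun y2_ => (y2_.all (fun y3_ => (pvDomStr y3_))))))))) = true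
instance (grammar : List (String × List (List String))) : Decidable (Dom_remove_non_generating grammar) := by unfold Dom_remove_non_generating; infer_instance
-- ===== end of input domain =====

-- B replaces A's repeated whole-grammar fixpoint rounds by a one-shot index
-- (per-production unresolved-nonterminal counters + occurrence lists) and a
-- worklist that propagates newly generating nonterminals; return value only —
-- neither program mutates its argument. A's Python iterates a set (hash order)
-- to build the result dict; the output dict is compared ignoring order, so
-- both ports emit the entries in grammar key order.

-- ===== PORT A =====
-- 'prod == ['ε'] or all(X not in non_terminals or X in generating for X in prod)':
-- the for-prod loop adds A and breaks on the first production satisfying either test = List.any.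
def pvGenProdA (nts gen : PySem.Set String) (prod : List String) : Bool :=
  prod == ["ε"] || prod.all (fun X => !(PySem.Set.contains nts X) || PySem.Set.contains gen X)

-- one execution of 'for A, prods in grammar.items(): …' with state (generating, changed)
def pvRoundA (nts : PySem.Set String) (grammar : List (String × List (List String)))
    (st : PySem.Set String × Bool) : PySem.Set String × Bool :=
  grammar.foldl (fun st AP =>
    if PySem.Set.contains st.1 AP.1 then st
    else if AP.2.any (pvGenProdA nts st.1) then (PySem.Set.add st.1 AP.1, true) else st) st

-- 'while changed:'; the fuel only makes the recursion total: a round with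
-- changed = True adds a new grammar key to generating, so grammar.length + 1
-- rounds always reach the quiescent round (fuel is never exhausted).
def pvLoopA (nts : PySem.Set String) (grammar : List (String × List (List String))) :
    Nat → PySem.Set String → PySem.Set String
  | 0, gen => gen
  | fuel + 1, gen =>
      let r := pvRoundA nts grammar (gen, false)
      if r.2 then pvLoopA nts grammar fuel r.1 else r.1

def remove_non_generating (grammar : List (String × List (List String))) : List (String × List (List String)) :=
  let nts : PySem.Set String := PySem.Set.ofList (grammar.map Prod.fst)
  let gen := pvLoopA nts grammar (grammar.length + 1) PySem.Set.empty
  -- 'for A in generating: …' iterates a Python set (hash order, not modelled); the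
  -- output dict is compared ignoring order, so the port emits the same entries in
  -- grammar key order ('if A not in grammar: continue' = the membership filter below).
  grammar.foldl (fun acc AP =>
    if PySem.Set.contains gen AP.1 then
      let nps := AP.2.filter (pvGenProdA nts gen)
      if nps.isEmpty then acc else acc ++ [(AP.1, nps)]
    else acc) []

-- ===== PORT B =====
-- Source B's 'syms = [] if prod == ['ε'] else [X for X in prod if X in non_terminals]'
def pvSyms (nts : PySem.Set String) (prod : List String) : List String :=
  if prod == ["ε"] then [] else prod.filter (fun X => PySem.Set.contains nts X)

-- the indexing state of Source B's first loop (occ, owner, counts, generating, queue, pid)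
structure PvInitSt where
  occ : PySem.Dict String (List Nat)
  owner : List String
  counts : List Int
  gen : PySem.Set String
  queue : List String
  pid : Nat

-- body of Source B's first loop for one production (A = f.1, prod = f.2);
-- 'occ.setdefault(X, []).append(pid)' = Dict.modify X [] (· ++ [pid])
def pvInitStep (nts : PySem.Set String) (st : PvInitSt) (f : String × List String) : PvInitSt :=
  let syms := pvSyms nts f.2
  let occ := syms.foldl (fun d X => d.modify X [] (· ++ [st.pid])) st.occ
  let owner := st.owner ++ [f.1]
  let counts := st.counts ++ [(PySem.List.len syms)]
  if syms.isEmpty && !(PySem.Set.contains st.gen f.1) then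
    ⟨occ, owner, counts, PySem.Set.add st.gen f.1, st.queue ++ [f.1], st.pid + 1⟩
  else
    ⟨occ, owner, counts, st.gen, st.queue, st.pid + 1⟩

-- body of Source B's 'for p in occ.get(X, []):'; pids are Nats (pid counts up from 0);
-- 'counts[p] -= 1' / 'owner[p]' use List.set/getD: p < counts.length = len(owner)
-- always holds (every pid in occ was registered), where they are exact.
def pvQStep (owner : List String) (st : List Int × PySem.Set String × List String) (p : Nat) :
    List Int × PySem.Set String × List String :=
  let c := st.1.getD p 0 - 1
  let counts := st.1.set p c
  if c == 0 then
    let A := owner.getD p ""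
    if !(PySem.Set.contains st.2.1 A) then (counts, PySem.Set.add st.2.1 A, st.2.2 ++ [A])
    else (counts, st.2.1, st.2.2)
  else (counts, st.2.1, st.2.2)

-- 'while queue:' with 'X = queue.pop()' (pop from the end); the fuel only makes the
-- recursion total: each iteration pops one element and every nonterminal is enqueued
-- at most once, so grammar.length + 1 iterations always empty the queue.
def pvQLoop (occ : PySem.Dict String (List Nat)) (owner : List String) :
    Nat → List Int → PySem.Set String → List String → PySem.Set String
  | 0, _, gen, _ => gen
  | fuel + 1, counts, gen, queue =>
      match queue.getLast? with
      | none => gen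
      | some X =>
          let st := (occ.getD X []).foldl (pvQStep owner) (counts, gen, queue.dropLast)
          pvQLoop occ owner fuel st.1 st.2.1 st.2.2

def remove_non_generating_alt (grammar : List (String × List (List String))) : List (String × List (List String)) :=
  let nts : PySem.Set String := PySem.Set.ofList (grammar.map Prod.fst)
  let st := grammar.foldl (fun st AP =>
      AP.2.foldl (fun s prod => pvInitStep nts s (AP.1, prod)) st)
    (⟨PySem.Dict.empty, [], [], PySem.Set.empty, [], 0⟩ : PvInitSt)
  let gen := pvQLoop st.occ st.owner (grammar.length + 1) st.counts st.gen st.queue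
  grammar.filterMap (fun AP =>
    if PySem.Set.contains gen AP.1 then
      let nps := AP.2.filter (fun prod =>
        prod == ["ε"] || prod.all (fun X => !(PySem.Set.contains nts X) || PySem.Set.contains gen X))
      if nps.isEmpty then none else some (AP.1, nps)
    else none)

-- ===== PRECONDITION & SPEC =====
def Spec_remove_non_generating (grammar : List (String × List (List String))) (out : List (String × List (List String))) : Prop := out = remove_non_generating_alt grammar
instance (grammar : List (String × List (List String))) (out : List (String × List (List String))) : Decidable (Spec_remove_non_generating grammar out) := by unfold Spec_remove_non_generating; infer_instance

-- ===== CLAIM (what is proved, stated in full; the proofs are below) =====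
def Claim_equal_remove_non_generating : Prop := ∀ (grammar : List (String × List (List String))), Dom_remove_non_generating grammar → Spec_remove_non_generating grammar (remove_non_generating grammar)

-- ===== LEMMAS AND PROOFS =====

-- the generating nonterminals, characterized inductively (both ports compute this set)
inductive PvGen (g : List (String × List (List String))) : String → Prop where
  | eps (A : String) (prods : List (List String))
      (hA : (A, prods) ∈ g) (hp : ["ε"] ∈ prods) : PvGen g A
  | step (A : String) (prods : List (List String)) (prod : List String)
      (hA : (A, prods) ∈ g) (hp : prod ∈ prods)
      (h : ∀ X, X ∈ prod → X ∈ g.map Prod.fst → PvGen g X) : PvGen g A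

def pvKeys (g : List (String × List (List String))) : List String := g.map Prod.fst

def pvNts (g : List (String × List (List String))) : PySem.Set String :=
  PySem.Set.ofList (pvKeys g)

-- the grammar flattened to (lhs, production) pairs, in order (Source B's pid order)
def pvFlat (g : List (String × List (List String))) : List (String × List String) :=
  g.flatMap (fun AP => AP.2.map (fun prod => (AP.1, prod)))

-- a production all of whose nonterminal symbols lie in gen
def PvGood (g : List (String × List (List String))) (gen : List String) (prod : List String) : Prop :=
  prod = ["ε"] ∨ ∀ X ∈ prod, X ∈ pvKeys g → X ∈ gen

def PvSound (g : List (String × List (List String))) (gen : List String) : Prop :=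
  ∀ x ∈ gen, PvGen g x

def PvClosed (g : List (String × List (List String))) (gen : List String) : Prop :=
  ∀ A prods, (A, prods) ∈ g → (∃ prod ∈ prods, PvGood g gen prod) → A ∈ gen

theorem pv_contains_nts (g : List (String × List (List String))) (X : String) :
    PySem.Set.contains (pvNts g) X = decide (X ∈ pvKeys g) := by
  rw [Bool.eq_iff_iff]
  simp [pvNts, PySem.Set.mem_ofList]

theorem pvGenProdA_iff (g : List (String × List (List String))) (gen : PySem.Set String)
    (prod : List String) : pvGenProdA (pvNts g) gen prod = true ↔ PvGood g gen prod := by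
  simp only [pvGenProdA, PvGood, pv_contains_nts, Bool.or_eq_true, beq_iff_eq,
    List.all_eq_true, Bool.or_eq_true, Bool.not_eq_eq_eq_not, Bool.not_true,
    decide_eq_false_iff_not, PySem.Set.contains_iff]
  constructor
  · rintro (h | h)
    · exact Or.inl h
    · exact Or.inr (fun X hX hk => ((h X hX).resolve_left (fun hn => hn hk)))
  · rintro (h | h)
    · exact Or.inl h
    · refine Or.inr (fun X hX => ?_)
      by_cases hk : X ∈ pvKeys g
      · exact Or.inr (h X hX hk)
      · exact Or.inl hk

-- a sound and closed set IS the set of generating nonterminals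
theorem pv_lfp (g : List (String × List (List String))) (gen : List String)
    (hs : PvSound g gen) (hc : PvClosed g gen) : ∀ x, PvGen g x ↔ x ∈ gen := by
  intro x
  constructor
  · intro hx
    induction hx with
    | eps A prods hA hp => exact hc A prods hA ⟨["ε"], hp, Or.inl rfl⟩
    | step A prods prod hA hp h ih =>
        exact hc A prods hA ⟨prod, hp, Or.inr (fun X hX hk => ih X hX hk)⟩
  · exact hs x

-- ---- A side ----

theorem pvRoundA_subset (g l : List (String × List (List String)))
    (st : PySem.Set String × Bool) (x : String) (hx : x ∈ st.1) :
    x ∈ (l.foldl (fun st AP =>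
      if PySem.Set.contains st.1 AP.1 then st
      else if AP.2.any (pvGenProdA (pvNts g) st.1) then (PySem.Set.add st.1 AP.1, true) else st) st).1 := by
  induction l generalizing st with
  | nil => exact hx
  | cons AP rest ih =>
      simp only [List.foldl_cons]
      split
      · exact ih _ hx
      · split
        · exact ih _ ((PySem.Set.mem_add _ _ _).mpr (Or.inl hx))
        · exact ih _ hx

theorem pvRoundA_scope (g l : List (String × List (List String)))
    (st : PySem.Set String × Bool) (x : String)
    (hx : x ∈ (l.foldl (fun st AP =>
      if PySem.Set.contains st.1 AP.1 then st
      else if AP.2.any (pvGenProdA (pvNts g) st.1) then (PySem.Set.add st.1 AP.1, true) else st) st).1) :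
    x ∈ st.1 ∨ x ∈ l.map Prod.fst := by
  induction l generalizing st with
  | nil => exact Or.inl hx
  | cons AP rest ih =>
      simp only [List.foldl_cons] at hx
      split at hx
      · rcases ih _ hx with h | h
        · exact Or.inl h
        · exact Or.inr (by simp [h])
      · split at hx
        · rcases ih _ hx with h | h
          · rcases (PySem.Set.mem_add _ _ _).mp h with h | h
            · exact Or.inl h
            · exact Or.inr (by simp [h])
          · exact Or.inr (by simp [h])
        · rcases ih _ hx with h | h
          · exact Or.inl h
          · exact Or.inr (by simp [h])

theorem pvRoundA_sound (g l : List (String × List (List String)))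
    (hl : ∀ AP ∈ l, AP ∈ g)
    (st : PySem.Set String × Bool) (hs : PvSound g st.1) :
    PvSound g (l.foldl (fun st AP =>
      if PySem.Set.contains st.1 AP.1 then st
      else if AP.2.any (pvGenProdA (pvNts g) st.1) then (PySem.Set.add st.1 AP.1, true) else st) st).1 := by
  induction l generalizing st with
  | nil => exact hs
  | cons AP rest ih =>
      have hAP : AP ∈ g := hl AP (by simp)
      simp only [List.foldl_cons]
      split
      · exact ih (fun x hx => hl x (by simp [hx])) _ hs
      · split
        · rename_i hany
          refine ih (fun x hx => hl x (by simp [hx])) _ ?_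
          intro x hx
          rcases (PySem.Set.mem_add _ _ _).mp hx with h | h
          · exact hs x h
          · subst h
            rcases List.any_eq_true.mp hany with ⟨prod, hp, hgood⟩
            rcases (pvGenProdA_iff g st.1 prod).mp hgood with he | hall
            · exact PvGen.eps AP.1 AP.2 (by simpa using hAP) (he ▸ hp)
            · exact PvGen.step AP.1 AP.2 prod (by simpa using hAP) hp
                (fun X hX hk => hs X (hall X hX hk))
        · exact ih (fun x hx => hl x (by simp [hx])) _ hs

theorem pvRoundA_flag (g l : List (String × List (List String))) (st : PySem.Set String × Bool)
    (h : st.2 = true) :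
    (l.foldl (fun st AP =>
      if PySem.Set.contains st.1 AP.1 then st
      else if AP.2.any (pvGenProdA (pvNts g) st.1) then (PySem.Set.add st.1 AP.1, true) else st) st).2 = true := by
  induction l generalizing st with
  | nil => exact h
  | cons AP rest ih =>
      simp only [List.foldl_cons]
      split
      · exact ih _ h
      · split
        · exact ih _ rfl
        · exact ih _ h

theorem pvRoundA_false (g l : List (String × List (List String))) (gen : PySem.Set String)
    (h : (l.foldl (fun st AP =>
      if PySem.Set.contains st.1 AP.1 then st
      else if AP.2.any (pvGenProdA (pvNts g) st.1) then (PySem.Set.add st.1 AP.1, true) else st)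
      (gen, false)).2 = false) :
    (l.foldl (fun st AP =>
      if PySem.Set.contains st.1 AP.1 then st
      else if AP.2.any (pvGenProdA (pvNts g) st.1) then (PySem.Set.add st.1 AP.1, true) else st)
      (gen, false)).1 = gen ∧
    ∀ AP ∈ l, AP.2.any (pvGenProdA (pvNts g) gen) = true → AP.1 ∈ gen := by
  induction l generalizing gen with
  | nil => exact ⟨rfl, by simp⟩
  | cons AP rest ih =>
      simp only [List.foldl_cons] at h ⊢
      by_cases hc : PySem.Set.contains gen AP.1 = true
      · rw [if_pos hc] at h ⊢
        obtain ⟨h1, h2⟩ := ih gen h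
        refine ⟨h1, ?_⟩
        intro BP hBP hany
        rcases List.mem_cons.mp hBP with he | hm
        · exact he ▸ (PySem.Set.contains_iff _ _).mp hc
        · exact h2 BP hm hany
      · rw [if_neg hc] at h ⊢
        by_cases hany : AP.2.any (pvGenProdA (pvNts g) gen) = true
        · rw [if_pos hany] at h
          have ht := pvRoundA_flag g rest (PySem.Set.add gen AP.1, true) rfl
          rw [h] at ht
          exact absurd ht (by simp)
        · rw [if_neg hany] at h ⊢
          obtain ⟨h1, h2⟩ := ih gen h
          refine ⟨h1, ?_⟩
          intro BP hBP hany'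
          rcases List.mem_cons.mp hBP with he | hm
          · exact absurd (he ▸ hany') hany
          · exact h2 BP hm hany'

theorem pvRoundA_quiescent (g : List (String × List (List String))) (gen : PySem.Set String)
    (hq : (pvRoundA (pvNts g) g (gen, false)).2 = false) :
    (pvRoundA (pvNts g) g (gen, false)).1 = gen ∧ PvClosed g gen := by
  obtain ⟨h1, h2⟩ := pvRoundA_false g g gen hq
  refine ⟨h1, ?_⟩
  intro A prods hA ⟨prod, hp, hgood⟩
  exact h2 (A, prods) hA (List.any_eq_true.mpr ⟨prod, hp, (pvGenProdA_iff g gen prod).mpr hgood⟩)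

theorem pvRoundA_changed_aux (g l : List (String × List (List String))) (gen : PySem.Set String)
    (hq : (l.foldl (fun st AP =>
      if PySem.Set.contains st.1 AP.1 then st
      else if AP.2.any (pvGenProdA (pvNts g) st.1) then (PySem.Set.add st.1 AP.1, true) else st)
      (gen, false)).2 = true) :
    ∃ x, x ∈ (l.foldl (fun st AP =>
      if PySem.Set.contains st.1 AP.1 then st
      else if AP.2.any (pvGenProdA (pvNts g) st.1) then (PySem.Set.add st.1 AP.1, true) else st)
      (gen, false)).1 ∧ x ∉ gen := by
  induction l generalizing gen with
  | nil => simp at hq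
  | cons AP rest ih =>
      simp only [List.foldl_cons] at hq ⊢
      by_cases hc : PySem.Set.contains gen AP.1 = true
      · rw [if_pos hc] at hq ⊢
        exact ih gen hq
      · rw [if_neg hc] at hq ⊢
        by_cases hany : AP.2.any (pvGenProdA (pvNts g) gen) = true
        · rw [if_pos hany]
          refine ⟨AP.1, ?_, fun hmem => hc ((PySem.Set.contains_iff _ _).mpr hmem)⟩
          exact pvRoundA_subset g rest _ AP.1 ((PySem.Set.mem_add _ _ _).mpr (Or.inr rfl))
        · rw [if_neg hany] at hq ⊢
          exact ih gen hq

theorem pvRoundA_changed (g : List (String × List (List String))) (gen : PySem.Set String)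
    (hq : (pvRoundA (pvNts g) g (gen, false)).2 = true) :
    ∃ x, x ∈ (pvRoundA (pvNts g) g (gen, false)).1 ∧ x ∉ gen :=
  pvRoundA_changed_aux g g gen hq

theorem pvLoopA_spec (g : List (String × List (List String))) (fuel : Nat)
    (gen : PySem.Set String)
    (hfuel : ((pvKeys g).toFinset \ gen.toFinset).card < fuel)
    (hs : PvSound g gen) :
    PvSound g (pvLoopA (pvNts g) g fuel gen) ∧ PvClosed g (pvLoopA (pvNts g) g fuel gen) := by
  induction fuel generalizing gen with
  | zero => omega
  | succ fuel ih =>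
      simp only [pvLoopA]
      by_cases hr : (pvRoundA (pvNts g) g (gen, false)).2 = true
      · rw [if_pos hr]
        obtain ⟨x, hx, hnx⟩ := pvRoundA_changed g gen hr
        have hsub : ∀ y ∈ gen, y ∈ (pvRoundA (pvNts g) g (gen, false)).1 :=
          fun y hy => pvRoundA_subset g g (gen, false) y hy
        have hxkeys : x ∈ pvKeys g := by
          rcases pvRoundA_scope g g (gen, false) x hx with h | h
          · exact absurd h hnx
          · exact h
        have hcard : ((pvKeys g).toFinset \ (pvRoundA (pvNts g) g (gen, false)).1.toFinset).card
            < ((pvKeys g).toFinset \ gen.toFinset).card := by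
          apply Finset.card_lt_card
          constructor
          · intro a ha
            simp only [Finset.mem_sdiff, List.mem_toFinset] at ha ⊢
            exact ⟨ha.1, fun hm => ha.2 (hsub a hm)⟩
          · intro hss
            have := hss (by simp only [Finset.mem_sdiff, List.mem_toFinset]; exact ⟨hxkeys, hnx⟩)
            simp only [Finset.mem_sdiff, List.mem_toFinset] at this
            exact this.2 hx
        exact ih _ (by omega) (pvRoundA_sound g g (fun AP h => h) (gen, false) hs)
      · rw [if_neg hr]
        obtain ⟨h1, h2⟩ := pvRoundA_quiescent g gen (by simpa using hr)
        rw [h1]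
        exact ⟨hs, h2⟩

-- ---- B side ----

def pvSymsAt (g : List (String × List (List String))) (p : Nat) : List String :=
  (((pvFlat g)[p]?).map (fun f => pvSyms (pvNts g) f.2)).getD []

def pvUnres (gen queue : List String) (Y : String) : Bool :=
  !(decide (Y ∈ gen) && !decide (Y ∈ queue))

def pvCnt (g : List (String × List (List String))) (gen queue : List String) (p : Nat) : Int :=
  (((pvSymsAt g p).filter (pvUnres gen queue)).length : Int)

-- all invariants of Source B's queue loop in one bundle
structure PvQInv (g : List (String × List (List String)))
    (counts : List Int) (gen : PySem.Set String) (queue : List String) : Prop where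
  qsub : ∀ x ∈ queue, x ∈ gen
  qnd : queue.Nodup
  gnd : gen.Nodup
  gkeys : ∀ x ∈ gen, x ∈ pvKeys g
  sound : PvSound g gen
  clen : counts.length = (pvFlat g).length
  trig : ∀ p, counts[p]? = some 0 → ((pvFlat g).map Prod.fst).getD p "" ∈ gen

theorem pv_nested_foldl_aux (nts : PySem.Set String) (l : List (String × List (List String)))
    (s0 : PvInitSt) :
    l.foldl (fun st AP => AP.2.foldl (fun s prod => pvInitStep nts s (AP.1, prod)) st) s0
      = (l.flatMap (fun AP => AP.2.map (fun prod => (AP.1, prod)))).foldl (pvInitStep nts) s0 := by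
  induction l generalizing s0 with
  | nil => rfl
  | cons AP rest ih =>
      simp only [List.foldl_cons, List.flatMap_cons, List.foldl_append, List.foldl_map]
      exact ih _

theorem pv_nested_foldl (g : List (String × List (List String))) (s0 : PvInitSt) :
    g.foldl (fun st AP => AP.2.foldl (fun s prod => pvInitStep (pvNts g) s (AP.1, prod)) st) s0
      = (pvFlat g).foldl (pvInitStep (pvNts g)) s0 :=
  pv_nested_foldl_aux (pvNts g) g s0

theorem pv_mem_flat (g : List (String × List (List String))) (A : String) (prod : List String) :
    (A, prod) ∈ pvFlat g ↔ ∃ prods, (A, prods) ∈ g ∧ prod ∈ prods := by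
  simp only [pvFlat, List.mem_flatMap, List.mem_map]
  constructor
  · rintro ⟨AP, hAP, prod', hp, he⟩
    obtain ⟨h1, h2⟩ := Prod.mk.injEq .. ▸ he
    exact ⟨AP.2, by rw [← h1]; exact (by simpa using hAP), h2 ▸ hp⟩
  · rintro ⟨prods, hA, hp⟩
    exact ⟨(A, prods), hA, prod, hp, rfl⟩

-- occ bookkeeping: one production's registration loop, counted
theorem pv_occ_fold_count (syms : List String) (k : Nat) (d : PySem.Dict String (List Nat))
    (X : String) (p : Nat) :
    (((syms.foldl (fun d Y => d.modify Y [] (· ++ [k])) d).getD X []).count p : Nat)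
      = ((d.getD X []).count p) + (if p = k then syms.count X else 0) := by
  induction syms generalizing d with
  | nil => simp
  | cons Y rest ih =>
      simp only [List.foldl_cons]
      rw [ih]
      rw [PySem.Dict.getD_modify]
      by_cases hXY : X = Y
      · subst hXY
        simp only [if_pos rfl, List.count_append, List.count_cons, List.count_nil,
          beq_self_eq_true, if_true]
        by_cases hpk : p = k
        · subst hpk
          simp
          omega
        · have h1 : (k == p) = false := beq_eq_false_iff_ne.mpr (Ne.symm hpk)
          simp [hpk, h1]
      · rw [if_neg hXY, List.count_cons]
        have hb : (Y == X) = false := beq_eq_false_iff_ne.mpr (Ne.symm hXY)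
        simp [hb]

-- a production whose tracked nonterminals are all generating has a generating lhs
theorem pvGen_of_syms (g : List (String × List (List String))) (A : String) (prod : List String)
    (hmem : (A, prod) ∈ pvFlat g)
    (hs : ∀ Y ∈ pvSyms (pvNts g) prod, PvGen g Y) : PvGen g A := by
  obtain ⟨prods, hA, hp⟩ := (pv_mem_flat g A prod).mp hmem
  by_cases hb : (prod == ["ε"]) = true
  · exact PvGen.eps A prods hA ((beq_iff_eq.mp hb) ▸ hp)
  · refine PvGen.step A prods prod hA hp (fun X hX hk => ?_)
    apply hs
    unfold pvSyms
    rw [if_neg hb]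
    refine List.mem_filter.mpr ⟨hX, ?_⟩
    rw [pv_contains_nts]
    exact decide_eq_true hk

theorem pv_flat_fst_keys (g : List (String × List (List String))) (p : Nat)
    (hp : p < (pvFlat g).length) : (pvFlat g)[p].1 ∈ pvKeys g := by
  have hm : (pvFlat g)[p] ∈ pvFlat g := List.getElem_mem hp
  obtain ⟨prods, hA, _⟩ := (pv_mem_flat g (pvFlat g)[p].1 (pvFlat g)[p].2).mp (by simpa using hm)
  exact List.mem_map.mpr ⟨((pvFlat g)[p].1, prods), hA, rfl⟩

-- pvUnres is constantly true when queue = gen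
theorem pvUnres_self (gen : List String) (Y : String) : pvUnres gen gen Y = true := by
  unfold pvUnres
  by_cases h : Y ∈ gen <;> simp [h]

-- popping X from the end of the queue shifts the unresolved count by count X
theorem pv_filter_pop (l : List String) (gen q' : List String) (X : String)
    (hXg : X ∈ gen) (hXq : X ∉ q') :
    ((l.filter (pvUnres gen (q' ++ [X]))).length : Int)
      = ((l.filter (pvUnres gen q')).length : Int) + (l.count X : Int) := by
  induction l with
  | nil => simp
  | cons Y rest ih =>
      simp only [List.filter_cons, List.count_cons]
      by_cases hYX : Y = X
      · subst hYX
        have h1 : pvUnres gen (q' ++ [Y]) Y = true := by simp [pvUnres, hXg]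
        have h2 : pvUnres gen q' Y = false := by simp [pvUnres, hXg, hXq]
        rw [h1, h2]
        simp only [List.length_cons, beq_self_eq_true, if_pos]
        push_cast
        rw [ih]
        ring
      · have he : pvUnres gen (q' ++ [X]) Y = pvUnres gen q' Y := by
          simp [pvUnres, hYX]
        rw [he]
        have : (Y == X) = false := by simp [hYX]
        rw [this]
        by_cases hu : pvUnres gen q' Y = true
        · rw [hu]
          simp only [List.length_cons, if_true]
          push_cast
          rw [ih]
          push_cast
          ring
        · rw [Bool.eq_false_iff.mpr hu]
          simpa using ih

-- enqueueing a new nonterminal into gen and queue at once leaves pvUnres unchanged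
theorem pvUnres_enqueue (gen queue : List String) (A Y : String) (hA : A ∉ gen) :
    pvUnres (gen ++ [A]) (queue ++ [A]) Y = pvUnres gen queue Y := by
  by_cases hYA : Y = A
  · subst hYA
    simp [pvUnres, hA]
  · simp [pvUnres, hYA]

theorem pvCnt_enqueue (g : List (String × List (List String))) (gen queue : List String)
    (A : String) (hA : A ∉ gen) (p : Nat) :
    pvCnt g (gen ++ [A]) (queue ++ [A]) p = pvCnt g gen queue p := by
  unfold pvCnt
  congr 2
  exact List.filter_congr (fun Y _ => pvUnres_enqueue gen queue A Y hA)

-- adding one new key-bound nonterminal to gen trades one unit of "missing" for the queue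
theorem pv_card_enqueue (g : List (String × List (List String))) (gen : List String)
    (A : String) (hkeys : A ∈ pvKeys g) (hA : A ∉ gen) :
    ((pvKeys g).toFinset \ (gen ++ [A]).toFinset).card + 1
      = ((pvKeys g).toFinset \ gen.toFinset).card := by
  have hset : (pvKeys g).toFinset \ (gen ++ [A]).toFinset
      = ((pvKeys g).toFinset \ gen.toFinset).erase A := by
    ext a
    simp only [Finset.mem_sdiff, List.mem_toFinset, Finset.mem_erase, List.mem_append,
      List.mem_singleton]
    constructor
    · rintro ⟨h1, h2⟩
      exact ⟨fun he => h2 (Or.inr he), h1, fun hm => h2 (Or.inl hm)⟩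
    · rintro ⟨h1, h2, h3⟩
      exact ⟨h2, fun hm => hm.elim h3 h1⟩
  have hmem : A ∈ (pvKeys g).toFinset \ gen.toFinset := by
    simp only [Finset.mem_sdiff, List.mem_toFinset]
    exact ⟨hkeys, hA⟩
  rw [hset, Finset.card_erase_of_mem hmem]
  have := Finset.card_pos.mpr ⟨A, hmem⟩
  omega

-- characterization of the state built by Source B's first loop
structure PvInitOut (g : List (String × List (List String))) (st : PvInitSt) : Prop where
  owner : st.owner = (pvFlat g).map Prod.fst
  qeq : st.queue = st.gen
  occ : ∀ X p, ((st.occ.getD X []).count p : Nat) = (pvSymsAt g p).count X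
  cnt : ∀ p, p < (pvFlat g).length → st.counts[p]? = some ((pvSymsAt g p).length : Int)
  clen : st.counts.length = (pvFlat g).length
  gnd : st.gen.Nodup
  gkeys : ∀ x ∈ st.gen, x ∈ pvKeys g
  sound : PvSound g st.gen
  trig : ∀ p, st.counts[p]? = some 0 → st.owner.getD p "" ∈ st.gen

theorem pv_init_aux (g : List (String × List (List String))) (l : List (String × List String)) :
    ∀ (pre : List (String × List String)) (st : PvInitSt),
    pvFlat g = pre ++ l →
    st.pid = pre.length →
    st.owner = pre.map Prod.fst →
    st.counts = pre.map (fun f => ((pvSyms (pvNts g) f.2).length : Int)) →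
    (∀ X p, ((st.occ.getD X []).count p : Nat)
      = ((((pre[p]?).map (fun f => pvSyms (pvNts g) f.2)).getD []).count X)) →
    st.queue = st.gen →
    st.gen.Nodup →
    (∀ x ∈ st.gen, x ∈ pvKeys g) →
    PvSound g st.gen →
    (∀ p, st.counts[p]? = some 0 → st.owner.getD p "" ∈ st.gen) →
    PvInitOut g (l.foldl (pvInitStep (pvNts g)) st) := by
  induction l with
  | nil =>
      intro pre st hflat hpid howner hcounts hocc hqg hgnd hgkeys hsound htrig
      rw [List.append_nil] at hflat
      subst hflat
      simp only [List.foldl_nil]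
      refine ⟨howner, hqg, ?_, ?_, by simp [hcounts], hgnd, hgkeys, hsound, htrig⟩
      · intro X p
        rw [hocc X p]
        rfl
      · intro p hp
        rw [hcounts]
        rw [List.getElem?_map]
        rw [List.getElem?_eq_getElem hp]
        simp [pvSymsAt, List.getElem?_eq_getElem hp]
  | cons f rest ih =>
      intro pre st hflat hpid howner hcounts hocc hqg hgnd hgkeys hsound htrig
      simp only [List.foldl_cons]
      have hlo : st.owner.length = pre.length := by rw [howner, List.length_map]
      have hlc : st.counts.length = pre.length := by rw [hcounts, List.length_map]
      have hfmem : (f.1, f.2) ∈ pvFlat g := by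
        rw [hflat]
        exact List.mem_append_right _ (by simp)
      have hfkeys : f.1 ∈ pvKeys g := by
        obtain ⟨prods, hA, _⟩ := (pv_mem_flat g f.1 f.2).mp hfmem
        exact List.mem_map.mpr ⟨(f.1, prods), hA, rfl⟩
      -- common field computations
      have hocc' : ∀ X p, (((pvInitStep (pvNts g) st f).occ.getD X []).count p : Nat)
          = (((((pre ++ [f])[p]?).map (fun f => pvSyms (pvNts g) f.2)).getD []).count X) := by
        intro X p
        have hfield : (pvInitStep (pvNts g) st f).occ
            = (pvSyms (pvNts g) f.2).foldl (fun d Y => d.modify Y [] (· ++ [st.pid])) st.occ := by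
          simp only [pvInitStep]
          split <;> rfl
        rw [hfield, pv_occ_fold_count, hocc X p, hpid]
        rcases Nat.lt_trichotomy p pre.length with hlt | heq | hgt
        · rw [List.getElem?_append_left hlt, if_neg (by omega)]
          omega
        · subst heq
          rw [List.getElem?_concat_length, if_pos rfl]
          simp [List.getElem?_eq_none (le_refl pre.length)]
        · have h1 : ((pre ++ [f]))[p]? = (none : Option (String × List String)) :=
            List.getElem?_eq_none (by rw [List.length_append]; simp; omega)
          have h2 : (pre)[p]? = (none : Option (String × List String)) :=
            List.getElem?_eq_none (by omega)
          rw [if_neg (by omega), h1, h2]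
          omega
      have hown' : (pvInitStep (pvNts g) st f).owner = (pre ++ [f]).map Prod.fst := by
        have hfield : (pvInitStep (pvNts g) st f).owner = st.owner ++ [f.1] := by
          simp only [pvInitStep]; split <;> rfl
        rw [hfield, howner]; simp
      have hcnt' : (pvInitStep (pvNts g) st f).counts
          = (pre ++ [f]).map (fun f => ((pvSyms (pvNts g) f.2).length : Int)) := by
        have hfield : (pvInitStep (pvNts g) st f).counts
            = st.counts ++ [(PySem.List.len (pvSyms (pvNts g) f.2))] := by
          simp only [pvInitStep]; split <;> rfl
        rw [hfield, hcounts]; simp [PySem.List.len_eq]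
      have hpid' : (pvInitStep (pvNts g) st f).pid = (pre ++ [f]).length := by
        have hfield : (pvInitStep (pvNts g) st f).pid = st.pid + 1 := by
          simp only [pvInitStep]; split <;> rfl
        rw [hfield, hpid]; simp
      by_cases hguard : ((pvSyms (pvNts g) f.2).isEmpty
          && !(PySem.Set.contains st.gen f.1)) = true
      · -- new immediately-generating lhs: enqueue it
        have hempt : pvSyms (pvNts g) f.2 = [] :=
          List.isEmpty_iff.mp (Bool.and_eq_true_iff.mp hguard).1
        have hnc : PySem.Set.contains st.gen f.1 = false := by
          have := (Bool.and_eq_true_iff.mp hguard).2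
          simpa using this
        have hnmem : f.1 ∉ st.gen := fun hm => by
          rw [(PySem.Set.contains_iff _ _).mpr hm] at hnc; cases hnc
        have hgen' : (pvInitStep (pvNts g) st f).gen = st.gen ++ [f.1] := by
          simp only [pvInitStep]
          rw [if_pos hguard]
          exact PySem.Set.add_of_not_mem hnmem
        have hque' : (pvInitStep (pvNts g) st f).queue = st.queue ++ [f.1] := by
          simp only [pvInitStep]
          rw [if_pos hguard]
        apply ih (pre ++ [f]) _ (by rw [hflat, List.append_assoc]; rfl) hpid' hown' hcnt' hocc'
        · rw [hque', hgen', hqg]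
        · rw [hgen']
          rw [← PySem.Set.add_of_not_mem hnmem]
          exact PySem.Set.nodup_add st.gen f.1 hgnd
        · rw [hgen']
          intro x hx
          rcases List.mem_append.mp hx with h | h
          · exact hgkeys x h
          · rw [List.mem_singleton.mp h]; exact hfkeys
        · rw [hgen']
          intro x hx
          rcases List.mem_append.mp hx with h | h
          · exact hsound x h
          · rw [List.mem_singleton.mp h]
            exact pvGen_of_syms g f.1 f.2 hfmem (by rw [hempt]; intro Y hY; cases hY)
        · intro p hp
          rw [hcnt'] at hp
          rw [hown', hgen']
          rcases Nat.lt_trichotomy p pre.length with hlt | heq | hgt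
          · rw [List.map_append, List.getElem?_append_left (by simpa using hlt)] at hp
            have hold : st.counts[p]? = some 0 := by rw [hcounts]; exact hp
            have hmem := htrig p hold
            rw [List.getD_eq_getElem?_getD, howner] at hmem
            rw [List.getD_eq_getElem?_getD, List.map_append,
              List.getElem?_append_left (by simpa using hlt)]
            exact List.mem_append_left _ hmem
          · subst heq
            have hm : ((pre ++ [f]).map Prod.fst) = pre.map Prod.fst ++ [f.1] := by simp
            rw [List.getD_eq_getElem?_getD, hm]
            have hl : pre.length = (pre.map Prod.fst).length := by simp
            rw [hl, List.getElem?_concat_length]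
            simp
          · rw [List.map_append,
              List.getElem?_eq_none (by rw [List.length_append]; simp; omega)] at hp
            cases hp
      · -- lhs not (newly) resolved here
        have hgen' : (pvInitStep (pvNts g) st f).gen = st.gen := by
          simp only [pvInitStep]
          rw [if_neg hguard]
        have hque' : (pvInitStep (pvNts g) st f).queue = st.queue := by
          simp only [pvInitStep]
          rw [if_neg hguard]
        apply ih (pre ++ [f]) _ (by rw [hflat, List.append_assoc]; rfl) hpid' hown' hcnt' hocc'
        · rw [hque', hgen', hqg]
        · rw [hgen']; exact hgnd
        · rw [hgen']; exact hgkeys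
        · rw [hgen']; exact hsound
        · intro p hp
          rw [hcnt'] at hp
          rw [hown', hgen']
          rcases Nat.lt_trichotomy p pre.length with hlt | heq | hgt
          · rw [List.map_append, List.getElem?_append_left (by simpa using hlt)] at hp
            have hold : st.counts[p]? = some 0 := by rw [hcounts]; exact hp
            have hmem := htrig p hold
            rw [List.getD_eq_getElem?_getD, howner] at hmem
            rw [List.getD_eq_getElem?_getD, List.map_append,
              List.getElem?_append_left (by simpa using hlt)]
            exact hmem
          · subst heq
            -- the appended production has count 0, so it has no tracked symbols,
            -- hence the guard can only have failed because f.1 is already generating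
            have hm2 : ((pre ++ [f]).map (fun f => ((pvSyms (pvNts g) f.2).length : Int)))
                = pre.map (fun f => ((pvSyms (pvNts g) f.2).length : Int))
                  ++ [((pvSyms (pvNts g) f.2).length : Int)] := by simp
            rw [hm2] at hp
            have hlen : pre.length = (pre.map (fun f => ((pvSyms (pvNts g) f.2).length : Int))).length := by simp
            rw [hlen, List.getElem?_concat_length] at hp
            have hz : ((pvSyms (pvNts g) f.2).length : Int) = 0 := by
              simpa using hp
            have hempt : (pvSyms (pvNts g) f.2).isEmpty = true := by
              rw [List.isEmpty_iff, ← List.length_eq_zero_iff]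
              exact_mod_cast hz
            have hcont : PySem.Set.contains st.gen f.1 = true := by
              by_contra hnc
              exact hguard (by
                rw [hempt, Bool.true_and, Bool.not_eq_true', Bool.eq_false_iff]
                exact hnc)
            have hm : ((pre ++ [f]).map Prod.fst) = pre.map Prod.fst ++ [f.1] := by simp
            rw [List.getD_eq_getElem?_getD, hm]
            have hl : pre.length = (pre.map Prod.fst).length := by simp
            rw [hl, List.getElem?_concat_length]
            simpa using (PySem.Set.contains_iff _ _).mp hcont
          · rw [List.map_append,
              List.getElem?_eq_none (by rw [List.length_append]; simp; omega)] at hp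
            cases hp

theorem pv_init_spec (g : List (String × List (List String))) :
    PvInitOut g ((pvFlat g).foldl (pvInitStep (pvNts g))
      ⟨PySem.Dict.empty, [], [], PySem.Set.empty, [], 0⟩) := by
  apply pv_init_aux g (pvFlat g) [] _ (by simp) rfl rfl rfl
  · intro X p
    simp [PySem.Dict.getD_empty]
  · rfl
  · exact List.nodup_nil
  · intro x hx; cases hx
  · intro x hx; cases hx
  · intro p hp; cases (by simpa using hp : (([] : List Int))[p]? = some 0) <;> simp_all

-- one inner pass 'for p in occ.get(X, [])' (ps): counters satisfying the residual
-- count equation keep doing so, and the measure queue+missing is preserved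
theorem pv_qstep_fold (g : List (String × List (List String))) (ps : List Nat) :
    ∀ (counts : List Int) (gen : PySem.Set String) (queue : List String),
    PvQInv g counts gen queue →
    (∀ p ∈ ps, p < (pvFlat g).length) →
    (∀ p, p < (pvFlat g).length →
      counts[p]? = some (pvCnt g gen queue p + (ps.count p : Int))) →
    PvQInv g (ps.foldl (pvQStep ((pvFlat g).map Prod.fst)) (counts, gen, queue)).1
        (ps.foldl (pvQStep ((pvFlat g).map Prod.fst)) (counts, gen, queue)).2.1
        (ps.foldl (pvQStep ((pvFlat g).map Prod.fst)) (counts, gen, queue)).2.2 ∧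
    (∀ p, p < (pvFlat g).length →
      (ps.foldl (pvQStep ((pvFlat g).map Prod.fst)) (counts, gen, queue)).1[p]?
        = some (pvCnt g (ps.foldl (pvQStep ((pvFlat g).map Prod.fst)) (counts, gen, queue)).2.1
            (ps.foldl (pvQStep ((pvFlat g).map Prod.fst)) (counts, gen, queue)).2.2 p)) ∧
    (ps.foldl (pvQStep ((pvFlat g).map Prod.fst)) (counts, gen, queue)).2.2.length
        + ((pvKeys g).toFinset \ (ps.foldl (pvQStep ((pvFlat g).map Prod.fst)) (counts, gen, queue)).2.1.toFinset).card
      = queue.length + ((pvKeys g).toFinset \ gen.toFinset).card := by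
  induction ps with
  | nil =>
      intro counts gen queue inv hval hJ
      exact ⟨inv, fun p hp => by simpa using hJ p hp, rfl⟩
  | cons p0 ps ih =>
      intro counts gen queue inv hval hJ
      have hp0 : p0 < (pvFlat g).length := hval p0 (by simp)
      have hval' : ∀ p ∈ ps, p < (pvFlat g).length := fun p hp => hval p (by simp [hp])
      have hgetA : ((pvFlat g).map Prod.fst).getD p0 "" = (pvFlat g)[p0].1 := by
        rw [List.getD_eq_getElem?_getD, List.getElem?_map, List.getElem?_eq_getElem hp0]
        rfl
      have hsymsAt : pvSymsAt g p0 = pvSyms (pvNts g) ((pvFlat g)[p0]).2 := by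
        simp [pvSymsAt, List.getElem?_eq_getElem hp0]
      have hJ0 := hJ p0 hp0
      have hgd : counts.getD p0 0 = pvCnt g gen queue p0 + ((p0 :: ps).count p0 : Int) := by
        rw [List.getD_eq_getElem?_getD, hJ0]
        rfl
      have hcc : counts.getD p0 0 - 1 = pvCnt g gen queue p0 + (ps.count p0 : Int) := by
        rw [hgd, List.count_cons_self]
        push_cast
        ring
      have hplen : p0 < counts.length := by rw [inv.clen]; exact hp0
      have hset : ∀ q, q < (pvFlat g).length →
          (counts.set p0 (counts.getD p0 0 - 1))[q]?
            = if q = p0 then some (pvCnt g gen queue p0 + (ps.count p0 : Int))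
              else counts[q]? := by
        intro q hq
        by_cases hqp : q = p0
        · subst hqp
          rw [if_pos rfl, List.getElem?_set_self hplen, hcc]
        · rw [if_neg hqp, List.getElem?_set_ne (fun h => hqp h.symm)]
      have hJshape : ∀ q, q < (pvFlat g).length → q ≠ p0 →
          counts[q]? = some (pvCnt g gen queue q + (ps.count q : Int)) := by
        intro q hq hqp
        have hcc2 : (p0 :: ps).count q = ps.count q := by
          rw [List.count_cons]
          simp [Ne.symm hqp]
        rw [hJ q hq, hcc2]
      simp only [List.foldl_cons]
      have hstep : pvQStep ((pvFlat g).map Prod.fst) (counts, gen, queue) p0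
          = (counts.set p0 (counts.getD p0 0 - 1),
             if (counts.getD p0 0 - 1 == 0) then
               (if !(PySem.Set.contains gen ((pvFlat g)[p0]).1) then
                  (PySem.Set.add gen ((pvFlat g)[p0]).1, queue ++ [((pvFlat g)[p0]).1])
                else (gen, queue))
             else (gen, queue)) := by
        simp only [pvQStep, hgetA]
        split <;> [skip; rfl]
        split <;> rfl
      rw [hstep]
      by_cases hc0 : (counts.getD p0 0 - 1 == 0) = true
      · have hz : pvCnt g gen queue p0 = 0 ∧ ps.count p0 = 0 := by
          have := beq_iff_eq.mp hc0
          rw [hcc] at this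
          have h1 : (0 : Int) ≤ pvCnt g gen queue p0 := Int.natCast_nonneg _
          have h2 : (0 : Int) ≤ (ps.count p0 : Int) := Int.natCast_nonneg _
          constructor
          · omega
          · exact_mod_cast (by omega : (ps.count p0 : Int) = 0)
        by_cases hcA : PySem.Set.contains gen ((pvFlat g)[p0]).1 = true
        · have hmemA : ((pvFlat g)[p0]).1 ∈ gen := (PySem.Set.contains_iff _ _).mp hcA
          rw [if_pos hc0, if_neg (by simp [hmemA])]
          apply ih
          · exact { inv with
              clen := by rw [List.length_set]; exact inv.clen
              trig := by
                intro q hq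
                by_cases hqlen : q < (pvFlat g).length
                · rw [hset q hqlen] at hq
                  by_cases hqp : q = p0
                  · subst hqp
                    rw [hgetA]
                    exact (PySem.Set.contains_iff _ _).mp hcA
                  · rw [if_neg hqp] at hq
                    exact inv.trig q hq
                · have hne : p0 ≠ q := by omega
                  have hcl : counts.length ≤ q := by rw [inv.clen]; omega
                  rw [List.getElem?_set_ne hne, List.getElem?_eq_none hcl] at hq
                  cases hq }
          · exact hval'
          · intro q hq
            rw [hset q hq]
            by_cases hqp : q = p0
            · subst hqp
              rw [if_pos rfl]
            · rw [if_neg hqp, hJshape q hq hqp]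
        · have hnA : ((pvFlat g)[p0]).1 ∉ gen := fun hm =>
            hcA ((PySem.Set.contains_iff _ _).mpr hm)
          rw [if_pos hc0, if_pos (by simp [hnA])]
          have hAkeys : ((pvFlat g)[p0]).1 ∈ pvKeys g := pv_flat_fst_keys g p0 hp0
          have hadd : PySem.Set.add gen ((pvFlat g)[p0]).1 = gen ++ [((pvFlat g)[p0]).1] :=
            PySem.Set.add_of_not_mem hnA
          rw [hadd]
          have hsoundA : PvGen g ((pvFlat g)[p0]).1 := by
            apply pvGen_of_syms g _ ((pvFlat g)[p0]).2 (by
              have : (pvFlat g)[p0] ∈ pvFlat g := List.getElem_mem hp0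
              simpa using this)
            intro Y hY
            have hfil : (pvSymsAt g p0).filter (pvUnres gen queue) = [] := by
              rw [← List.length_eq_zero_iff]
              have := hz.1
              unfold pvCnt at this
              exact_mod_cast this
            have hYs : Y ∈ pvSymsAt g p0 := by rw [hsymsAt]; exact hY
            have hu : pvUnres gen queue Y = false := by
              cases h : pvUnres gen queue Y
              · rfl
              · exfalso
                have hmf : Y ∈ (pvSymsAt g p0).filter (pvUnres gen queue) :=
                  List.mem_filter.mpr ⟨hYs, h⟩
                rw [hfil] at hmf
                cases hmf
            have hYg : Y ∈ gen := by
              by_contra hng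
              unfold pvUnres at hu
              simp [hng] at hu
            exact inv.sound Y hYg
          obtain ⟨ihInv, ihJ, ihMu⟩ := ih (counts.set p0 (counts.getD p0 0 - 1))
            (gen ++ [((pvFlat g)[p0]).1]) (queue ++ [((pvFlat g)[p0]).1])
            { qsub := by
                intro x hx
                rcases List.mem_append.mp hx with h | h
                · exact List.mem_append_left _ (inv.qsub x h)
                · exact List.mem_append_right _ h
              qnd := by
                refine List.Nodup.append inv.qnd (List.nodup_singleton _) ?_
                intro a ha hb
                rw [List.mem_singleton.mp hb] at ha
                exact hnA (inv.qsub _ ha)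
              gnd := by
                refine List.Nodup.append inv.gnd (List.nodup_singleton _) ?_
                intro a ha hb
                exact hnA ((List.mem_singleton.mp hb) ▸ ha)
              gkeys := by
                intro x hx
                rcases List.mem_append.mp hx with h | h
                · exact inv.gkeys x h
                · rw [List.mem_singleton.mp h]; exact hAkeys
              sound := by
                intro x hx
                rcases List.mem_append.mp hx with h | h
                · exact inv.sound x h
                · rw [List.mem_singleton.mp h]; exact hsoundA
              clen := by rw [List.length_set]; exact inv.clen
              trig := by
                intro q hq
                by_cases hqlen : q < (pvFlat g).length
                · rw [hset q hqlen] at hq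
                  by_cases hqp : q = p0
                  · subst hqp
                    rw [hgetA]
                    exact List.mem_append_right _ (by simp)
                  · rw [if_neg hqp] at hq
                    exact List.mem_append_left _ (inv.trig q hq)
                · have hne : p0 ≠ q := by omega
                  have hcl : counts.length ≤ q := by rw [inv.clen]; omega
                  rw [List.getElem?_set_ne hne, List.getElem?_eq_none hcl] at hq
                  cases hq }
            hval'
            (by
              intro q hq
              rw [hset q hq, pvCnt_enqueue g gen queue _ hnA q]
              by_cases hqp : q = p0
              · subst hqp
                rw [if_pos rfl]
              · rw [if_neg hqp, hJshape q hq hqp])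
          refine ⟨ihInv, ihJ, ?_⟩
          have hcard := pv_card_enqueue g gen ((pvFlat g)[p0]).1 hAkeys hnA
          have hql : (queue ++ [((pvFlat g)[p0]).1]).length = queue.length + 1 := by
            rw [List.length_append]
            rfl
          omega
      · rw [if_neg (by simpa using hc0)]
        apply ih
        · exact { inv with
            clen := by rw [List.length_set]; exact inv.clen
            trig := by
              intro q hq
              by_cases hqlen : q < (pvFlat g).length
              · rw [hset q hqlen] at hq
                by_cases hqp : q = p0
                · rw [if_pos hqp] at hq
                  have hz0 : counts.getD p0 0 - 1 = 0 := by
                    rw [hcc]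
                    exact Option.some.inj hq
                  exact absurd (beq_iff_eq.mpr hz0) (by simpa using hc0)
                · rw [if_neg hqp] at hq
                  exact inv.trig q hq
              · have hne : p0 ≠ q := by omega
                have hcl : counts.length ≤ q := by rw [inv.clen]; omega
                rw [List.getElem?_set_ne hne, List.getElem?_eq_none hcl] at hq
                cases hq }
        · exact hval'
        · intro q hq
          rw [hset q hq]
          by_cases hqp : q = p0
          · subst hqp
            rw [if_pos rfl]
          · rw [if_neg hqp, hJshape q hq hqp]

theorem pv_qloop_spec (g : List (String × List (List String)))
    (occ : PySem.Dict String (List Nat))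
    (hocc : ∀ X p, (occ.getD X []).count p = (pvSymsAt g p).count X)
    (fuel : Nat) (counts : List Int) (gen : PySem.Set String) (queue : List String)
    (inv : PvQInv g counts gen queue)
    (hJ : ∀ p, p < (pvFlat g).length → counts[p]? = some (pvCnt g gen queue p))
    (hfuel : queue.length + ((pvKeys g).toFinset \ gen.toFinset).card < fuel) :
    PvSound g (pvQLoop occ ((pvFlat g).map Prod.fst) fuel counts gen queue) ∧
    PvClosed g (pvQLoop occ ((pvFlat g).map Prod.fst) fuel counts gen queue) := by
  induction fuel generalizing counts gen queue with
  | zero => omega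
  | succ fuel ih =>
      simp only [pvQLoop]
      cases hql : queue.getLast? with
      | none =>
          have hqe : queue = [] := List.getLast?_eq_none_iff.mp hql
          subst hqe
          refine ⟨inv.sound, ?_⟩
          intro A prods hA ⟨prod, hp, hgood⟩
          have hmem : (A, prod) ∈ pvFlat g := (pv_mem_flat g A prod).mpr ⟨prods, hA, hp⟩
          obtain ⟨p, hplen, he⟩ := List.mem_iff_getElem.mp hmem
          have hsymsAt : pvSymsAt g p = pvSyms (pvNts g) prod := by
            simp [pvSymsAt, List.getElem?_eq_getElem hplen, he]
          have hcnt0 : pvCnt g gen [] p = 0 := by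
            unfold pvCnt
            rw [hsymsAt]
            have hfil : (pvSyms (pvNts g) prod).filter (pvUnres gen []) = [] := by
              rcases hgood with hε | hall
              · subst hε
                unfold pvSyms
                rw [if_pos (by rfl)]
                rfl
              · apply List.filter_eq_nil_iff.mpr
                intro Y hY
                have hYp : Y ∈ prod ∧ Y ∈ pvKeys g := by
                  unfold pvSyms at hY
                  split at hY
                  · cases hY
                  · have := List.mem_filter.mp hY
                    refine ⟨this.1, ?_⟩
                    have := this.2
                    rw [pv_contains_nts] at this
                    exact of_decide_eq_true this
                have hYg : Y ∈ gen := hall Y hYp.1 hYp.2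
                simp [pvUnres, hYg]
            rw [hfil]
            rfl
          have hq0 : counts[p]? = some 0 := by
            rw [hJ p hplen, hcnt0]
          have := inv.trig p hq0
          rw [List.getD_eq_getElem?_getD, List.getElem?_map,
            List.getElem?_eq_getElem hplen, he] at this
          exact this
      | some X =>
          have hne : queue ≠ [] := by
            intro h
            rw [h] at hql
            cases hql
          have hXeq : queue.getLast hne = X := by
            have hgl := List.getLast?_eq_some_getLast hne
            rw [hql] at hgl
            exact (Option.some.inj hgl).symm
          have hqe : queue.dropLast ++ [X] = queue := by
            rw [← hXeq]
            exact List.dropLast_concat_getLast hne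
          have hXq : X ∈ queue := by
            rw [← hqe]
            exact List.mem_append_right _ (by simp)
          have hXg : X ∈ gen := inv.qsub X hXq
          have hXnd : X ∉ queue.dropLast := by
            intro hmem
            have := inv.qnd
            rw [← hqe, List.nodup_append] at this
            exact this.2.2 X hmem X (List.mem_singleton_self X) rfl
          have invd : PvQInv g counts gen queue.dropLast :=
            { qsub := fun x hx => inv.qsub x (List.Sublist.mem hx (List.dropLast_sublist queue))
              qnd := List.Sublist.nodup (List.dropLast_sublist queue) inv.qnd
              gnd := inv.gnd
              gkeys := inv.gkeys
              sound := inv.sound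
              clen := inv.clen
              trig := inv.trig }
          have hval : ∀ p ∈ occ.getD X [], p < (pvFlat g).length := by
            intro p hp
            by_contra hge
            have hc := hocc X p
            have hnone : (pvFlat g)[p]? = none := List.getElem?_eq_none (by omega)
            have : (pvSymsAt g p) = [] := by
              simp [pvSymsAt, hnone]
            rw [this] at hc
            simp at hc
            exact (List.count_pos_iff.mpr hp).ne' (by omega)
          have hJ' : ∀ p, p < (pvFlat g).length →
              counts[p]? = some (pvCnt g gen queue.dropLast p
                + ((occ.getD X []).count p : Int)) := by
            intro p hp
            rw [hJ p hp]
            congr 1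
            have hpop := pv_filter_pop (pvSymsAt g p) gen queue.dropLast X hXg hXnd
            rw [hqe] at hpop
            unfold pvCnt
            rw [hocc X p, hpop]
          obtain ⟨inv', hJ2, hMu⟩ := pv_qstep_fold g (occ.getD X []) counts gen
            queue.dropLast invd hval hJ'
          have hdl : queue.dropLast.length + 1 = queue.length := by
            have hq0 : 0 < queue.length := List.length_pos_iff.mpr hne
            rw [List.length_dropLast]
            omega
          have hlt : queue.dropLast.length + ((pvKeys g).toFinset \ gen.toFinset).card < fuel := by
            omega
          refine ih _ _ _ inv' hJ2 ?_
          rw [hMu]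
          exact hlt

-- ---- assembly ----

theorem pvOut_sim (nts gen : PySem.Set String) (l : List (String × List (List String)))
    (acc : List (String × List (List String))) :
    l.foldl (fun acc AP =>
      if PySem.Set.contains gen AP.1 then
        let nps := AP.2.filter (pvGenProdA nts gen)
        if nps.isEmpty then acc else acc ++ [(AP.1, nps)]
      else acc) acc =
    acc ++ l.filterMap (fun AP =>
      if PySem.Set.contains gen AP.1 then
        let nps := AP.2.filter (fun prod =>
          prod == ["ε"] || prod.all (fun X => !(PySem.Set.contains nts X) || PySem.Set.contains gen X))
        if nps.isEmpty then none else some (AP.1, nps)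
      else none) := by
  rw [show (fun prod => prod == ["\u03b5"] ||
      prod.all (fun X => !(PySem.Set.contains nts X) || PySem.Set.contains gen X)) = pvGenProdA nts gen from rfl]
  induction l generalizing acc with
  | nil => simp
  | cons AP rest ih =>
      simp only [List.foldl_cons, List.filterMap_cons]
      by_cases hg : PySem.Set.contains gen AP.1 = true
      · by_cases he : (AP.2.filter (pvGenProdA nts gen)).isEmpty = true
        · simp only [hg, he, if_pos]
          rw [ih]
        · simp only [hg, if_pos, he, if_neg, Bool.false_eq_true, not_false_eq_true]
          rw [ih]
          simp
      · simp only [hg, Bool.false_eq_true, if_neg, not_false_eq_true]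
        rw [ih]

theorem pvOut_congr (nts genA genB : PySem.Set String) (l : List (String × List (List String)))
    (h : ∀ x, PySem.Set.contains genA x = PySem.Set.contains genB x) :
    l.filterMap (fun AP =>
      if PySem.Set.contains genA AP.1 then
        let nps := AP.2.filter (fun prod =>
          prod == ["ε"] || prod.all (fun X => !(PySem.Set.contains nts X) || PySem.Set.contains genA X))
        if nps.isEmpty then none else some (AP.1, nps)
      else none) =
    l.filterMap (fun AP =>
      if PySem.Set.contains genB AP.1 then
        let nps := AP.2.filter (fun prod =>
          prod == ["ε"] || prod.all (fun X => !(PySem.Set.contains nts X) || PySem.Set.contains genB X))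
        if nps.isEmpty then none else some (AP.1, nps)
      else none) := by
  simp only [h]

-- proof-only abbreviations for the two computed generating sets and the output phase
def pvStf (g : List (String × List (List String))) : PvInitSt :=
  (pvFlat g).foldl (pvInitStep (pvNts g)) ⟨PySem.Dict.empty, [], [], PySem.Set.empty, [], 0⟩

def pvGenA (g : List (String × List (List String))) : PySem.Set String :=
  pvLoopA (pvNts g) g (g.length + 1) PySem.Set.empty

def pvGenB (g : List (String × List (List String))) : PySem.Set String :=
  pvQLoop (pvStf g).occ ((pvFlat g).map Prod.fst) (g.length + 1)
    (pvStf g).counts (pvStf g).gen (pvStf g).queue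

def pvOutB (g : List (String × List (List String))) (gen : PySem.Set String) :
    List (String × List (List String)) :=
  g.filterMap (fun AP =>
    if PySem.Set.contains gen AP.1 then
      let nps := AP.2.filter (fun prod =>
        prod == ["ε"] || prod.all (fun X => !(PySem.Set.contains (pvNts g) X) || PySem.Set.contains gen X))
      if nps.isEmpty then none else some (AP.1, nps)
    else none)

theorem pv_a_eq (g : List (String × List (List String))) :
    remove_non_generating g = pvOutB g (pvGenA g) := by
  unfold remove_non_generating
  dsimp only
  rw [show PySem.Set.ofList (g.map Prod.fst) = pvNts g from rfl]
  rw [pvOut_sim (pvNts g) (pvLoopA (pvNts g) g (g.length + 1) PySem.Set.empty) g []]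
  rw [List.nil_append]
  rfl

theorem pv_alt_eq (g : List (String × List (List String))) :
    remove_non_generating_alt g = pvOutB g (pvGenB g) := by
  unfold remove_non_generating_alt pvOutB pvGenB pvStf
  dsimp only
  rw [show PySem.Set.ofList (g.map Prod.fst) = pvNts g from rfl]
  rw [pv_nested_foldl g]
  rw [(pv_init_spec g).owner]

theorem pv_genA_lfp (g : List (String × List (List String))) :
    ∀ x, PvGen g x ↔ x ∈ pvGenA g := by
  have hempty : ((pvKeys g).toFinset \ (PySem.Set.empty : PySem.Set String).toFinset).card
      < g.length + 1 := by
    have h0 : ((PySem.Set.empty : PySem.Set String).toFinset) = ∅ := rfl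
    rw [h0, Finset.sdiff_empty]
    have h1 : (pvKeys g).toFinset.card ≤ (pvKeys g).length := List.toFinset_card_le _
    have h2 : (pvKeys g).length = g.length := by simp [pvKeys]
    omega
  obtain ⟨sA, cA⟩ := pvLoopA_spec g (g.length + 1) PySem.Set.empty hempty
    (fun x hx => absurd hx (List.not_mem_nil))
  exact pv_lfp g (pvGenA g) sA cA

theorem pv_genB_lfp (g : List (String × List (List String))) :
    ∀ x, PvGen g x ↔ x ∈ pvGenB g := by
  have hinit : PvInitOut g (pvStf g) := pv_init_spec g
  have inv0 : PvQInv g (pvStf g).counts (pvStf g).gen (pvStf g).queue :=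
    { qsub := fun x hx => hinit.qeq ▸ hx
      qnd := hinit.qeq ▸ hinit.gnd
      gnd := hinit.gnd
      gkeys := hinit.gkeys
      sound := hinit.sound
      clen := hinit.clen
      trig := fun p hp => by
        have := hinit.trig p hp
        rwa [hinit.owner] at this }
  have hJ0 : ∀ p, p < (pvFlat g).length →
      (pvStf g).counts[p]? = some (pvCnt g (pvStf g).gen (pvStf g).queue p) := by
    intro p hp
    rw [hinit.cnt p hp]
    congr 1
    unfold pvCnt
    rw [hinit.qeq]
    rw [List.filter_eq_self.mpr (fun Y _ => pvUnres_self (pvStf g).gen Y)]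
  have hfuel : (pvStf g).queue.length
      + ((pvKeys g).toFinset \ (pvStf g).gen.toFinset).card < g.length + 1 := by
    rw [hinit.qeq]
    have hsub : (pvStf g).gen.toFinset ⊆ (pvKeys g).toFinset := fun a ha =>
      List.mem_toFinset.mpr (hinit.gkeys a (List.mem_toFinset.mp ha))
    have hcard := Finset.card_sdiff_add_card_eq_card hsub
    have hlen : (pvStf g).gen.toFinset.card = (pvStf g).gen.length :=
      List.toFinset_card_of_nodup hinit.gnd
    have h1 : (pvKeys g).toFinset.card ≤ (pvKeys g).length := List.toFinset_card_le _
    have h2 : (pvKeys g).length = g.length := by simp [pvKeys]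
    have h3 : (pvStf g).gen.toFinset.card ≤ (pvKeys g).toFinset.card := Finset.card_le_card hsub
    omega
  obtain ⟨sB, cB⟩ := pv_qloop_spec g (pvStf g).occ hinit.occ (g.length + 1)
    (pvStf g).counts (pvStf g).gen (pvStf g).queue inv0 hJ0 hfuel
  exact pv_lfp g (pvGenB g) sB cB

-- ===== VERDICT (by name: the statement is the Claim_ definition above) =====
theorem remove_non_generating_spec : Claim_equal_remove_non_generating := by
  intro g _
  unfold Spec_remove_non_generating
  rw [pv_a_eq g, pv_alt_eq g]
  unfold pvOutB
  apply pvOut_congr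
  intro x
  rw [Bool.eq_iff_iff]
  simp only [PySem.Set.contains_iff]
  rw [← pv_genA_lfp g x, ← pv_genB_lfp g x]
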